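-- pv_equiv track=rewrite | github.com/Djeelika8/Lesson2 | Number Systems.py | poisk_chisla10
-- ===== SOURCE A (Python) =====
-- def poisk_chisla10(n, base):  # ПЕРЕВОД в ДЕСЯТИЧНУЮ
--     st = 0  # разряд для возведения в степень
--     num = 0  # итоговое число
--     while n > 0:
--         digit = n % 10  # добыли последнюю цифру
--         num = num + (digit * base ** st)
--         n //= 10  # отщипнули последнюю цифру
--         st += 1
--     return num
-- ===== SOURCE B (Python) =====
-- def poisk_chisla10(n, base):
--     # Horner's method over the decimal digits, most-significant first; no exponentiation.
--     if n <= 0: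
--         return 0
--     digits = []
--     while n > 0:
--         digits.append(n % 10)
--         n //= 10
--     num = 0
--     for d in reversed(digits):
--         num = num * base + d
--     return num
-- ===== Notes on version B (the rewrite author's own statement) =====
-- stated objective: alternative
-- what changed: Replaces the low-to-high loop that adds digit * base ** st (recomputing a power each step) with Horner's method: digits are collected once, then folded high-to-low with num = num * base + digit, eliminating exponentiation.
import Mathlib
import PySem

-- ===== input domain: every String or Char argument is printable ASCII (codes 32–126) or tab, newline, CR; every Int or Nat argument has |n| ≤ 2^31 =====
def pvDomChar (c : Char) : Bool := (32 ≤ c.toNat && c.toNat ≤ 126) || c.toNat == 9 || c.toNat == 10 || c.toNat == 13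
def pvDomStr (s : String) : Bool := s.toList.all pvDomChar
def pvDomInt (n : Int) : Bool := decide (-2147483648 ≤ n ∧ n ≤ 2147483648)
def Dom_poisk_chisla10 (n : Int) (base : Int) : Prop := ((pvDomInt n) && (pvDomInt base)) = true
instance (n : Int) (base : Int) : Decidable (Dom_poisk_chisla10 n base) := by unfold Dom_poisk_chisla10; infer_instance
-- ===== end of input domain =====

-- B: Horner's method over the decimal digits (high-to-low fold), no exponentiation; an alternative decomposition of the same conversion.
-- ===== PORT A =====
-- while n > 0: digit = n % 10; num += digit * base ** st; n //= 10; st += 1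
def pvGoA (base : Int) (n : Int) (st : Nat) (num : Int) : Int :=
  if h : n > 0 then
    pvGoA base (PySem.Int.floordiv n 10) (st + 1) (num + PySem.Int.mod n 10 * base ^ st)
  else num
termination_by n.toNat
decreasing_by
  have h1 : PySem.Int.floordiv n 10 = n / 10 := PySem.Int.floordiv_eq_ediv_of_pos (by omega)
  omega

def poisk_chisla10 (n : Int) (base : Int) : Int := pvGoA base n 0 0

-- ===== PORT B =====
-- digits of n, least significant first (the while loop collecting n % 10)
def pvDigitsB (n : Int) : List Int :=
  if h : n > 0 then PySem.Int.mod n 10 :: pvDigitsB (PySem.Int.floordiv n 10)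
  else []
termination_by n.toNat
decreasing_by
  have h1 : PySem.Int.floordiv n 10 = n / 10 := PySem.Int.floordiv_eq_ediv_of_pos (by omega)
  omega

def poisk_chisla10_alt (n : Int) (base : Int) : Int :=
  if n ≤ 0 then 0
  else (pvDigitsB n).reverse.foldl (fun acc d => acc * base + d) 0

-- ===== PRECONDITION & SPEC =====
def Spec_poisk_chisla10 (n : Int) (base : Int) (out : Int) : Prop := out = poisk_chisla10_alt n base
instance (n : Int) (base : Int) (out : Int) : Decidable (Spec_poisk_chisla10 n base out) := by unfold Spec_poisk_chisla10; infer_instance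

-- ===== CLAIM (what is proved, stated in full; the proofs are below) =====
def Claim_equal_poisk_chisla10 : Prop := ∀ (n : Int) (base : Int), Dom_poisk_chisla10 n base → Spec_poisk_chisla10 n base (poisk_chisla10 n base)


-- ===== LEMMAS AND PROOFS below; VERDICT at the bottom =====

-- Horner value of n's digit list
lemma pvHorner_step (base n : Int) (h : n > 0) :
    (pvDigitsB n).reverse.foldl (fun acc d => acc * base + d) 0
      = ((pvDigitsB (PySem.Int.floordiv n 10)).reverse.foldl (fun acc d => acc * base + d) 0) * base
        + PySem.Int.mod n 10 := by
  rw [pvDigitsB]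
  simp [h, List.foldl_append]

lemma pvGoA_eq (base : Int) : ∀ (k : Nat) (n : Int) (st : Nat) (num : Int), n.toNat ≤ k →
    pvGoA base n st num
      = num + base ^ st * ((pvDigitsB n).reverse.foldl (fun acc d => acc * base + d) 0) := by
  intro k
  induction k with
  | zero =>
    intro n st num hk
    have hn : ¬ n > 0 := by omega
    rw [pvGoA, pvDigitsB]
    simp [hn]
  | succ k ih =>
    intro n st num hk
    by_cases h : n > 0
    · have hfd : PySem.Int.floordiv n 10 = n / 10 := PySem.Int.floordiv_eq_ediv_of_pos (by omega)
      have hle : (PySem.Int.floordiv n 10).toNat ≤ k := by omega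
      rw [pvGoA]
      simp only [h, dif_pos, ih _ _ _ hle, pvHorner_step base n h]
      ring
    · rw [pvGoA, pvDigitsB]
      simp [h]

theorem poisk_chisla10_spec : Claim_equal_poisk_chisla10 := by
  intro n base _
  unfold Spec_poisk_chisla10 poisk_chisla10 poisk_chisla10_alt
  by_cases h : n ≤ 0
  · rw [pvGoA]
    simp [h, show ¬ n > 0 by omega]
  · rw [pvGoA_eq base n.toNat n 0 0 le_rfl]
    simp [h]
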